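-- pv_equiv track=rewrite | github.com/cloudlinux/kuberdock-platform | kubedock/kapi/ippool.py | get_missed_intervals
-- ===== SOURCE A (Python) =====
-- def get_missed_intervals(ip_blocks, start_ip, end_ip):
--     missed_blocks = []
--     next_ip = int(start_ip)
--     for block in ip_blocks:
--         if block[0] > next_ip:
--             missed_blocks.append((next_ip, block[0] - 1))
--         next_ip = block[1] + 1
--     if int(end_ip) >= next_ip:
--         missed_blocks.append((next_ip, int(end_ip)))
--     return missed_blocks
-- ===== SOURCE B (Python) =====
-- def get_missed_intervals(ip_blocks, start_ip, end_ip):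
--     starts = [int(start_ip)] + [b[1] + 1 for b in ip_blocks]
--     ends = [b[0] - 1 for b in ip_blocks] + [int(end_ip)]
--     return [(s, e) for s, e in zip(starts, ends) if s <= e]
-- ===== Notes on version B (the rewrite author's own statement) =====
-- stated objective: alternative
-- what changed: Replaces the loop threading a mutable next_ip with precomputed boundary lists (starts = start plus each block-end+1, ends = each block-start-1 plus end) zipped and filtered by s <= e.
import Mathlib
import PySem

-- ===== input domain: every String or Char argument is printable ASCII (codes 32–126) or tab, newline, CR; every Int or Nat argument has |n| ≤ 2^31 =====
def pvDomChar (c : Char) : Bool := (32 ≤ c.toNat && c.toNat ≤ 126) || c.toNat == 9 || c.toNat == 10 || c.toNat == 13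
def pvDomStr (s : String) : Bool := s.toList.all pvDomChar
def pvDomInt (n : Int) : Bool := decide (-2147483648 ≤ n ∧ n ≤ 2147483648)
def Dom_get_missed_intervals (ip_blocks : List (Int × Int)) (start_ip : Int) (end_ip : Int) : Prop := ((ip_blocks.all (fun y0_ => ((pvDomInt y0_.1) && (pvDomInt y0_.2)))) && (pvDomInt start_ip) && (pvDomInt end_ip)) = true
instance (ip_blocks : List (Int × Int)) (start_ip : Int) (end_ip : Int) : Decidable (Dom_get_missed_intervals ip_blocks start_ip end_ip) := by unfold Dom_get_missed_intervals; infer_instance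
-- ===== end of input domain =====

-- ===== PORT A =====
-- Port B replaces A's loop carrying next_ip by boundary lists zipped and filtered (alternative decomposition; return value only).
def get_missed_intervals (ip_blocks : List (Int × Int)) (start_ip : Int) (end_ip : Int) : List (Int × Int) :=
  let st := ip_blocks.foldl
    (fun (acc : List (Int × Int) × Int) block =>
      (if block.1 > acc.2 then acc.1 ++ [(acc.2, block.1 - 1)] else acc.1, block.2 + 1))
    ([], start_ip)
  if end_ip ≥ st.2 then st.1 ++ [(st.2, end_ip)] else st.1

-- ===== PORT B =====
def get_missed_intervals_alt (ip_blocks : List (Int × Int)) (start_ip : Int) (end_ip : Int) : List (Int × Int) :=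
  let starts := start_ip :: ip_blocks.map (fun b => b.2 + 1)
  let ends := ip_blocks.map (fun b => b.1 - 1) ++ [end_ip]
  (starts.zip ends).filter (fun p => p.1 ≤ p.2)

-- ===== PRECONDITION & SPEC =====
def Spec_get_missed_intervals (ip_blocks : List (Int × Int)) (start_ip : Int) (end_ip : Int) (out : List (Int × Int)) : Prop := out = get_missed_intervals_alt ip_blocks start_ip end_ip
instance (ip_blocks : List (Int × Int)) (start_ip : Int) (end_ip : Int) (out : List (Int × Int)) : Decidable (Spec_get_missed_intervals ip_blocks start_ip end_ip out) := by unfold Spec_get_missed_intervals; infer_instance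

-- ===== CLAIM (what is proved, stated in full; the proofs are below) =====
def Claim_equal_get_missed_intervals : Prop := ∀ (ip_blocks : List (Int × Int)) (start_ip : Int) (end_ip : Int), Dom_get_missed_intervals ip_blocks start_ip end_ip → Spec_get_missed_intervals ip_blocks start_ip end_ip (get_missed_intervals ip_blocks start_ip end_ip)

-- ===== LEMMAS AND PROOFS =====

theorem gmi_loop (ip_blocks : List (Int × Int)) (m : List (Int × Int)) (n : Int) (e : Int) :
    (let st := ip_blocks.foldl
        (fun (acc : List (Int × Int) × Int) block =>
          (if block.1 > acc.2 then acc.1 ++ [(acc.2, block.1 - 1)] else acc.1, block.2 + 1))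
        (m, n)
      if e ≥ st.2 then st.1 ++ [(st.2, e)] else st.1)
    = m ++ ((n :: ip_blocks.map (fun b => b.2 + 1)).zip
              (ip_blocks.map (fun b => b.1 - 1) ++ [e])).filter (fun p => p.1 ≤ p.2) := by
  induction ip_blocks generalizing m n with
  | nil =>
    simp only [List.foldl_nil, List.map_nil, List.nil_append, List.zip_cons_cons,
      List.zip_nil_right, List.filter_cons, List.filter_nil]
    by_cases h : e ≥ n
    · simp [h]
    · have : ¬ (n ≤ e) := fun hc => h hc
      simp [this]
  | cons blk rest ih =>
    simp only [List.foldl_cons, List.map_cons, List.cons_append, List.zip_cons_cons,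
      List.filter_cons]
    by_cases h : blk.1 > n
    · have hle : n ≤ blk.1 - 1 := by omega
      rw [ih]
      simp [h, hle]
    · have hle : ¬ (n ≤ blk.1 - 1) := by omega
      rw [ih]
      simp [h, hle]

-- ===== VERDICT (by name: the statement is the Claim_ definition above) =====
theorem get_missed_intervals_spec : Claim_equal_get_missed_intervals := by
  intro ip_blocks s e _
  unfold Spec_get_missed_intervals get_missed_intervals get_missed_intervals_alt
  simpa using gmi_loop ip_blocks [] s e
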